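-- pv_equiv track=rewrite | github.com/Jopce/flightscraper | scraper.py | find_cheapest_round_trip
-- ===== SOURCE A (Python) =====
-- def find_cheapest_round_trip(round_trips):
--     if not round_trips:
--         return []
--
--     min_price = round_trips[0]["price"]
--     cheapest_round_trips = [round_trips[0]]
--
--     for trip in round_trips[1:]:
--         if trip["price"] == min_price:
--             cheapest_round_trips.append(trip)
--         if trip["price"] < min_price:
--             min_price = trip["price"]
--             cheapest_round_trips = [trip]
--
--     return cheapest_round_trips
-- ===== SOURCE B (Python) =====
-- def find_cheapest_round_trip(round_trips):
--     if not round_trips: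
--         return []
--     m = min(t["price"] for t in round_trips)
--     return [t for t in round_trips if t["price"] == m]
-- ===== Notes on version B (the rewrite author's own statement) =====
-- stated objective: simpler
-- what changed: Replaces A's fused running-minimum loop (with append-or-reset list maintenance) by a two-pass compute-min-then-filter decomposition.
import Mathlib
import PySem

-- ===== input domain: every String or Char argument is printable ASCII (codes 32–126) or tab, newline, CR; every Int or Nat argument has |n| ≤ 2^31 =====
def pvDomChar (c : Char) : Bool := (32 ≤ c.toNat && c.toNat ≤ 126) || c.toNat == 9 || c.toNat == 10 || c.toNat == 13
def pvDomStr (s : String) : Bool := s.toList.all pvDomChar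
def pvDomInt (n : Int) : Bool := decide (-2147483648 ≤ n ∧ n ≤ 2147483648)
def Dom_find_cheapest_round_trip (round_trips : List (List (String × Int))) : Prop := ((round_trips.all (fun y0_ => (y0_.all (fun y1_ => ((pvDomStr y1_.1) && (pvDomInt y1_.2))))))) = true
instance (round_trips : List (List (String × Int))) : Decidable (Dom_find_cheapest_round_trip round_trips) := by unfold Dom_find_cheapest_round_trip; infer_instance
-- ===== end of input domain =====

-- B replaces A's fused running-minimum-and-collect loop by a min-then-filter two-pass
-- decomposition ('simpler'); return values agree on every input with all "price" keys present.

-- trip["price"] — exact under Pre_ (the key is present; Python raises KeyError otherwise)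
def pvPrice (t : List (String × Int)) : Int := ((PySem.Dict.mk t).get? "price").getD 0

-- ===== PORT A =====
-- the for-loop over round_trips[1:] with state (min_price, cheapest_round_trips)
def pvLoopA (l : List (List (String × Int))) (min_price : Int)
    (acc : List (List (String × Int))) : Int × List (List (String × Int)) :=
  match l with
  | [] => (min_price, acc)
  | trip :: rest =>
      let acc' := if pvPrice trip = min_price then acc ++ [trip] else acc
      if pvPrice trip < min_price then pvLoopA rest (pvPrice trip) [trip]
      else pvLoopA rest min_price acc'

def find_cheapest_round_trip (round_trips : List (List (String × Int))) : List (List (String × Int)) :=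
  match round_trips with
  | [] => []
  | t0 :: rest => (pvLoopA rest (pvPrice t0) [t0]).2

-- ===== PORT B =====
def find_cheapest_round_trip_alt (round_trips : List (List (String × Int))) : List (List (String × Int)) :=
  match round_trips with
  | [] => []
  | _ :: _ =>
      let m := (PySem.List.min? (round_trips.map pvPrice) (fun x => x)).getD 0
      round_trips.filter (fun t => pvPrice t = m)

-- ===== PRECONDITION & SPEC =====
-- Pre_ excludes exactly the inputs where some trip lacks the "price" key: there A raises KeyError
-- (and B raises KeyError too).
def Pre_find_cheapest_round_trip (round_trips : List (List (String × Int))) : Prop :=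
  ∀ t ∈ round_trips, ((PySem.Dict.mk t).get? "price").isSome
instance (round_trips : List (List (String × Int))) : Decidable (Pre_find_cheapest_round_trip round_trips) := by unfold Pre_find_cheapest_round_trip; infer_instance
def pvWitness_find_cheapest_round_trip : (List (List (String × Int))) := [[("price", 3)], [("price", 2), ("id", 7)]]

def Spec_find_cheapest_round_trip (round_trips : List (List (String × Int))) (out : List (List (String × Int))) : Prop := out = find_cheapest_round_trip_alt round_trips
instance (round_trips : List (List (String × Int))) (out : List (List (String × Int))) : Decidable (Spec_find_cheapest_round_trip round_trips out) := by unfold Spec_find_cheapest_round_trip; infer_instance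

-- ===== CLAIM (what is proved, stated in full; the proofs are below) =====
def Claim_equal_find_cheapest_round_trip : Prop := ∀ (round_trips : List (List (String × Int))), Dom_find_cheapest_round_trip round_trips → Pre_find_cheapest_round_trip round_trips → Spec_find_cheapest_round_trip round_trips (find_cheapest_round_trip round_trips)

-- ===== LEMMAS AND PROOFS =====

theorem pvFoldMin_le (l : List (List (String × Int))) (m : Int) :
    l.foldl (fun a t => min a (pvPrice t)) m ≤ m := by
  induction l generalizing m with
  | nil => simp
  | cons u us ihu => exact le_trans (ihu _) (min_le_left _ _)

-- the loop's invariant: it returns the running minimum folded over the tail, and either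
-- appends the tail's minimal trips to acc (no improvement) or exactly the minimal trips of the tail
theorem pvLoopA_spec (l : List (List (String × Int))) (m : Int) (acc : List (List (String × Int))) :
    pvLoopA l m acc =
      (l.foldl (fun a t => min a (pvPrice t)) m,
       (if l.foldl (fun a t => min a (pvPrice t)) m = m then acc else [])
         ++ l.filter (fun t => pvPrice t = l.foldl (fun a t => min a (pvPrice t)) m)) := by
  induction l generalizing m acc with
  | nil => simp [pvLoopA]
  | cons t rest ih =>
      simp only [pvLoopA, List.foldl_cons]
      by_cases hlt : pvPrice t < m
      · rw [if_pos hlt, ih]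
        have hm : min m (pvPrice t) = pvPrice t := min_eq_right (le_of_lt hlt)
        simp only [hm]
        have hle := pvFoldMin_le rest (pvPrice t)
        have hne : rest.foldl (fun a t => min a (pvPrice t)) (pvPrice t) ≠ m := by omega
        rw [if_neg hne]
        by_cases heq : rest.foldl (fun a t => min a (pvPrice t)) (pvPrice t) = pvPrice t
        · simp [heq]
        · simp [heq, Ne.symm heq]
      · rw [if_neg hlt]
        have hm : min m (pvPrice t) = m := min_eq_left (by omega)
        simp only [hm]
        rw [ih]
        have hle := pvFoldMin_le rest m
        by_cases heq : pvPrice t = m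
        · rw [if_pos heq]
          by_cases hfin : rest.foldl (fun a t => min a (pvPrice t)) m = m
          · simp [hfin, heq, List.append_assoc]
          · have : pvPrice t ≠ rest.foldl (fun a t => min a (pvPrice t)) m := by omega
            simp [hfin, this]
        · rw [if_neg heq]
          have hne2 : pvPrice t ≠ rest.foldl (fun a t => min a (pvPrice t)) m := by omega
          simp [hne2]

-- ===== VERDICT (by name: the statement is the Claim_ definition above) =====
theorem find_cheapest_round_trip_spec : Claim_equal_find_cheapest_round_trip := by
  intro rts _hdom _hpre
  unfold Spec_find_cheapest_round_trip find_cheapest_round_trip find_cheapest_round_trip_alt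
  match rts with
  | [] => rfl
  | t0 :: rest =>
      simp only [pvLoopA_spec, List.map_cons, PySem.List.min?_id_cons, List.foldl_map,
        Option.getD_some, List.filter_cons]
      by_cases hfin : rest.foldl (fun a t => min a (pvPrice t)) (pvPrice t0) = pvPrice t0
      · simp [hfin]
      · have hle := pvFoldMin_le rest (pvPrice t0)
        have : ¬ (pvPrice t0 = rest.foldl (fun a t => min a (pvPrice t)) (pvPrice t0)) := by omega
        simp [hfin, this]
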